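-- pv_equiv track=rewrite | github.com/SoumavaBiswas/codeforce | Div2A/doremy_paint.py | check
-- ===== SOURCE A (Python) =====
-- def check(arr):
--     if len(set(arr))>2:
--         return "No"
--     counter1 = 1
--     n = len(arr)
--     for i in range(1, len(arr)):
--         if arr[i] == arr[0]:
--             counter1 += 1
--     if counter1 == n:
--         return "Yes"
--     counter2 = n - counter1
--     if abs(counter1-counter2)>1:
--         return "No"
--     return "Yes"
-- ===== SOURCE B (Python) =====
-- def check(arr):
--     s = sorted(arr)
--     n = len(s)
--     h = n // 2
--
--     def cut_ok(c):
--         # sorted, so each side is constant iff its endpoints agree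
--         return (c == 0 or s[c - 1] == s[0]) and (c == n or s[c] == s[n - 1])
--
--     return "Yes" if cut_ok(h) or cut_ok(n - h) else "No"
-- ===== Notes on version B (the rewrite author's own statement) =====
-- stated objective: alternative
-- what changed: B sorts the array and answers by checking whether the sorted list splits at floor or ceiling of the half-length into two constant runs (endpoint comparisons only), instead of A's distinct-set guard plus a loop counting occurrences of the first element and comparing the two counts.
-- intended difference: On the empty list A returns 'No' only because its count variable is initialised to one for a non-existent first element, while B returns 'Yes', the intended value since an empty array vacuously has at most two values with balanced counts. — e.g. on check([]): A returns "No", B returns "Yes"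
import Mathlib
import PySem

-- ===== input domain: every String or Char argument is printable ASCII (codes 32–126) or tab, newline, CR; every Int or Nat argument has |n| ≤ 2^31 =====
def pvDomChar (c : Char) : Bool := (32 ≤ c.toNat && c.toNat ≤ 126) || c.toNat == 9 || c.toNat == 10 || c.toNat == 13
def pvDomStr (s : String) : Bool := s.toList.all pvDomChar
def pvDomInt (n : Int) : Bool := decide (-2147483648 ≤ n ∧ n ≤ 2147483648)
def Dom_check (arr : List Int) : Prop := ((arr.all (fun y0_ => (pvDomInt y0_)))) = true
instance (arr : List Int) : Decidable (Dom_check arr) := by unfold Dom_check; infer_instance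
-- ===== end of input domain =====

-- B replaces A's distinct-set guard + count-of-arr[0] loop by a sort: the answer is "Yes" iff the
-- sorted array splits at floor(n/2) or ceil(n/2) into two constant runs (endpoint checks only).

-- ===== PORT A =====
def check (arr : List Int) : String :=
  if PySem.Set.len (PySem.Set.ofList arr) > 2 then "No"
  else
    let n : Int := PySem.List.len arr
    let counter1 : Int := (PySem.List.pyRange 1 (PySem.List.len arr) 1).foldl
      (fun c i => if PySem.List.pyGetD arr i 0 == PySem.List.pyGetD arr 0 0 then c + 1 else c) 1
    if counter1 = n then "Yes"
    else
      let counter2 : Int := n - counter1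
      if |counter1 - counter2| > 1 then "No" else "Yes"

-- ===== PORT B =====
-- Source B's inner 'cut_ok': both sides are guarded endpoint comparisons on the sorted list
def cutOk (s : List Int) (n c : Int) : Bool :=
  (c == 0 || PySem.List.pyGetD s (c - 1) 0 == PySem.List.pyGetD s 0 0) &&
  (c == n || PySem.List.pyGetD s c 0 == PySem.List.pyGetD s (n - 1) 0)

def check_alt (arr : List Int) : String :=
  let s := PySem.List.sorted arr (fun x => x) false
  let n : Int := PySem.List.len s
  let h : Int := PySem.Int.floordiv n 2
  if cutOk s n h || cutOk s n (n - h) then "Yes" else "No"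

-- ===== PRECONDITION & SPEC =====
-- On the empty list A returns "No" only because counter1 starts at 1 for a non-existent first
-- element; B returns "Yes", the intended value (an empty array vacuously has ≤ 2 balanced values).
def D_check (arr : List Int) : Prop := arr = []
instance (arr : List Int) : Decidable (D_check arr) := by unfold D_check; infer_instance
def Spec_check (arr : List Int) (out : String) : Prop := ¬ D_check arr → out = check_alt arr
instance (arr : List Int) (out : String) : Decidable (Spec_check arr out) := by unfold Spec_check; infer_instance
def pvDiffWitness_check : List Int := []
def pvDiffWitnessOut_check : String × String := ("No", "Yes")

-- ===== CLAIM (what is proved, stated in full; the proofs are below) =====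
def Claim_unchanged_check : Prop := ∀ (arr : List Int), Dom_check arr → Spec_check arr (check arr)
def Claim_changed_check : Prop := Dom_check (pvDiffWitness_check) ∧ D_check (pvDiffWitness_check) ∧ check (pvDiffWitness_check) = pvDiffWitnessOut_check.1 ∧ check_alt (pvDiffWitness_check) = pvDiffWitnessOut_check.2 ∧ pvDiffWitnessOut_check.1 ≠ pvDiffWitnessOut_check.2
def Claim_exact_check : Prop := ∀ (arr : List Int), Dom_check arr → D_check arr → check arr ≠ check_alt arr

-- ===== LEMMAS AND PROOFS =====

lemma getElem_rep_rep (a b : Int) (p q i : Nat) (hi : i < p + q) :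
    (List.replicate p a ++ List.replicate q b)[i]'(by simpa using hi) = if i < p then a else b := by
  rcases Nat.lt_or_ge i p with h | h
  · rw [List.getElem_append_left (by simpa using h), List.getElem_replicate, if_pos h]
  · rw [List.getElem_append_right (by simpa using h), List.getElem_replicate, if_neg (not_lt.mpr h)]

-- A's counting loop computes 1 + (occurrences of arr[0] in the tail)
lemma counter1_eq (h : Int) (t : List Int) :
    (PySem.List.pyRange 1 (PySem.List.len (h :: t)) 1).foldl
      (fun c i => if PySem.List.pyGetD (h :: t) i 0 == PySem.List.pyGetD (h :: t) 0 0 then c + 1 else c) 1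
    = 1 + (t.count h : Int) := by
  have h0 : PySem.List.pyGetD (h :: t) 0 0 = h := by simp [pysem]
  rw [h0]
  rw [PySem.List.foldl_pyRange_pyGetD (h :: t) 0 (fun c x => if x == h then c + 1 else c) 1 (by norm_num)]
  rw [show ((1 : Int)).toNat = 1 from rfl, List.drop_one, List.tail_cons]
  rw [PySem.List.foldl_count_if (fun x => x == h) t 1]
  simp [List.count]

-- the first element inserted into a Python set is the first element listed
lemma foldl_add_head? (t : List Int) : ∀ (s : PySem.Set Int), s ≠ [] →
    (t.foldl PySem.Set.add s).head? = s.head? := by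
  induction t with
  | nil => intro s _; rfl
  | cons x xs ih =>
    intro s hs
    rw [List.foldl_cons]
    by_cases hc : PySem.Set.contains s x = true
    · rw [show PySem.Set.add s x = s by unfold PySem.Set.add; rw [if_pos hc], ih s hs]
    · rw [show PySem.Set.add s x = s ++ [x] by unfold PySem.Set.add; rw [if_neg hc],
        ih _ (by simp), List.head?_append_of_ne_nil s hs]

lemma ofList_head? (arr : List Int) : (PySem.Set.ofList arr).head? = arr.head? := by
  cases arr with
  | nil => rfl
  | cons h t =>
    rw [PySem.Set.ofList_eq_foldl, List.foldl_cons]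
    have : PySem.Set.add ([] : PySem.Set Int) h = [h] := rfl
    rw [this, foldl_add_head? t [h] (by simp)]; rfl

-- on a nonempty sorted list, cut_ok(c) holds iff the list is c copies of its head followed by
-- (n-c) copies of its last element
lemma cutOk_iff (s : List Int) (hne : s ≠ []) (hpw : s.Pairwise (fun x y : Int => x ≤ y))
    (c : Nat) (hc : c ≤ s.length) :
    (cutOk s (PySem.List.len s) (c : Int) = true) ↔
      s = List.replicate c (s.head hne) ++ List.replicate (s.length - c) (s.getLast hne) := by
  have hn : 0 < s.length := List.length_pos_iff.mpr hne
  have hlen : PySem.List.len s = (s.length : Int) := by simp [pysem]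
  have hget : ∀ (i : Nat), i < s.length → ∀ h', PySem.List.pyGetD s (i : Int) 0 = s[i]'h' := by
    intro i hi h'
    rw [PySem.List.pyGetD_natCast]; exact List.getD_eq_getElem s 0 hi
  have hget0 : PySem.List.pyGetD s 0 0 = s[0]'hn := by
    rw [show (0 : Int) = ((0 : Nat) : Int) from rfl]; exact hget 0 hn hn
  have hmono : ∀ (i j : Nat) (hij : i ≤ j) (hj : j < s.length), s[i]'(by omega) ≤ s[j]'hj := by
    intro i j hij hj
    rcases Nat.eq_or_lt_of_le hij with rfl | hlt
    · exact le_refl _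
    · exact List.pairwise_iff_getElem.mp hpw i j (by omega) hj hlt
  rw [List.head_eq_getElem hne, List.getLast_eq_getElem hne]
  unfold cutOk
  rw [hlen, Bool.and_eq_true, Bool.or_eq_true, Bool.or_eq_true, beq_iff_eq, beq_iff_eq,
    beq_iff_eq, beq_iff_eq]
  constructor
  · rintro ⟨h1, h2⟩
    apply List.ext_getElem (by simp; omega)
    intro i hi hi'
    rw [getElem_rep_rep _ _ _ _ _ (by omega)]
    split_ifs with hic
    · -- i < c : everything below the cut equals s[0]
      have hc1 : ((c : Int)) ≠ 0 := by omega
      rcases h1 with h1 | h1; · exact absurd h1 hc1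
      have hcast : ((c : Int)) - 1 = ((c - 1 : Nat) : Int) := by omega
      rw [hcast, hget _ (by omega) (by omega), hget0] at h1
      exact le_antisymm (le_of_le_of_eq (hmono i (c - 1) (by omega) (by omega)) h1)
        (hmono 0 i (by omega) hi)
    · -- c ≤ i : everything above the cut equals s[length-1]
      have hcn : ((c : Int)) ≠ ((s.length : Nat) : Int) := by omega
      rcases h2 with h2 | h2; · exact absurd h2 hcn
      have hcast : ((s.length : Nat) : Int) - 1 = ((s.length - 1 : Nat) : Int) := by omega
      rw [hcast, hget _ (by omega) (by omega), hget _ (by omega) (by omega)] at h2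
      exact le_antisymm (hmono i (s.length - 1) (by omega) (by omega))
        (le_of_eq_of_le h2.symm (hmono c i (by omega) hi))
  · intro hs
    have hrep : ∀ (i : Nat) (hi : i < s.length),
        s[i]'hi = if i < c then s[0]'hn else s[s.length - 1]'(by omega) := by
      intro i hi
      exact (List.getElem_of_eq hs hi).trans (getElem_rep_rep _ _ _ _ _ (by omega))
    constructor
    · by_cases hc0 : c = 0
      · left; omega
      · right
        have hcast : ((c : Int)) - 1 = ((c - 1 : Nat) : Int) := by omega
        rw [hcast, hget _ (by omega) (by omega), hget0, hrep (c - 1) (by omega),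
          hrep 0 hn, if_pos (by omega), if_pos (by omega)]
    · by_cases hcn : c = s.length
      · left; omega
      · right
        rw [hget _ (by omega) (by omega),
          show ((s.length : Nat) : Int) - 1 = ((s.length - 1 : Nat) : Int) by omega,
          hget _ (by omega) (by omega), hrep c (by omega), hrep (s.length - 1) (by omega),
          if_neg (by omega), if_neg (by omega)]

-- exactly two distinct values u < v: the sorted list is the run of u's followed by the run of v's
lemma sorted_two_val (x : Int) (t : List Int) (u v : Int) (huv : u < v)
    (hmem : ∀ y ∈ x :: t, y = u ∨ y = v) :
    PySem.List.sorted (x :: t) (fun z => z) false =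
      List.replicate ((x :: t).count u) u ++ List.replicate ((x :: t).count v) v := by
  apply PySem.List.sorted_id_eq_of_perm_of_pairwise
  · rw [List.perm_iff_count]
    intro z
    rw [List.count_append, List.count_replicate, List.count_replicate]
    simp only [beq_iff_eq]
    by_cases hzu : u = z
    · subst hzu; rw [if_pos rfl, if_neg (by omega)]; omega
    · by_cases hzv : v = z
      · subst hzv; rw [if_neg hzu, if_pos rfl]; omega
      · rw [if_neg hzu, if_neg hzv,
          List.count_eq_zero.mpr (fun hz => by rcases hmem z hz with h | h <;> omega)]
  · rw [List.pairwise_append]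
    refine ⟨List.pairwise_replicate_of_refl, List.pairwise_replicate_of_refl, ?_⟩
    intro p hp q hq
    rw [List.eq_of_mem_replicate hp, List.eq_of_mem_replicate hq]
    exact le_of_lt huv

-- exactly two distinct values: the two counts sum to the length
lemma count_pair (a b : Int) (h : a ≠ b) (l : List Int) (hl : ∀ x ∈ l, x = a ∨ x = b) :
    l.count a + l.count b = l.length := by
  induction l with
  | nil => simp
  | cons x xs ih =>
    have hx := hl x (List.mem_cons_self)
    have hxs : ∀ y ∈ xs, y = a ∨ y = b := fun y hy => hl y (List.mem_cons_of_mem _ hy)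
    have hIH := ih hxs
    rcases hx with rfl | rfl <;> simp [h, Ne.symm h] <;> omega

-- with exactly two values u < v present, cut_ok(c) holds iff c is the number of u's
lemma cut_two (x : Int) (t : List Int) (u v : Int) (huv : u < v)
    (hmem : ∀ y ∈ x :: t, y = u ∨ y = v) (hu : u ∈ x :: t) (hv : v ∈ x :: t)
    (c : Nat) (hc : c ≤ (PySem.List.sorted (x :: t) (fun z => z) false).length) :
    (cutOk (PySem.List.sorted (x :: t) (fun z => z) false)
        (PySem.List.len (PySem.List.sorted (x :: t) (fun z => z) false)) (c : Int) = true)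
      ↔ c = (x :: t).count u := by
  have hstruct := sorted_two_val x t u v huv hmem
  set s := PySem.List.sorted (x :: t) (fun z => z) false with hsdef
  have hpw : s.Pairwise (fun a b : Int => a ≤ b) := PySem.List.sorted_pairwise _ _
  have hsne : s ≠ [] := by rw [hstruct]; have := List.count_pos_iff.mpr hu; simp; omega
  have hcu : 0 < (x :: t).count u := List.count_pos_iff.mpr hu
  have hcv : 0 < (x :: t).count v := List.count_pos_iff.mpr hv
  have hsum : (x :: t).count u + (x :: t).count v = (x :: t).length :=
    count_pair u v (by omega) _ hmem
  have hslen : s.length = (x :: t).count u + (x :: t).count v := by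
    rw [hstruct]; simp
  have hn : 0 < s.length := by omega
  have hhead : s.head hsne = u := by
    rw [List.head_eq_getElem hsne, List.getElem_of_eq hstruct (by omega),
      getElem_rep_rep _ _ _ _ _ (by omega), if_pos (by omega)]
  have hlast : s.getLast hsne = v := by
    rw [List.getLast_eq_getElem hsne, List.getElem_of_eq hstruct (by omega),
      getElem_rep_rep _ _ _ _ _ (by omega), if_neg (by omega)]
  rw [cutOk_iff s hsne hpw c hc, hhead, hlast]
  constructor
  · intro h
    have hcnt := congrArg (List.count u) (hstruct.symm.trans h)
    rw [List.count_append, List.count_append, List.count_replicate_self,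
      List.count_replicate_self, List.count_replicate, List.count_replicate] at hcnt
    rw [if_neg (by simp; omega), if_neg (by simp; omega)] at hcnt
    omega
  · intro h
    subst h
    rw [show s.length - (x :: t).count u = (x :: t).count v by omega]
    exact hstruct

lemma main_eq (arr : List Int) (hne : arr ≠ []) : check arr = check_alt arr := by
  obtain ⟨x, t, rfl⟩ : ∃ x t, arr = x :: t := by
    cases arr with
    | nil => exact absurd rfl hne
    | cons x t => exact ⟨x, t, rfl⟩
  have hperm : (PySem.List.sorted (x :: t) (fun z => z) false).Perm (x :: t) :=
    PySem.List.sorted_perm _ _ _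
  have hpw : (PySem.List.sorted (x :: t) (fun z => z) false).Pairwise (fun a b : Int => a ≤ b) :=
    PySem.List.sorted_pairwise _ _
  have hsne : PySem.List.sorted (x :: t) (fun z => z) false ≠ [] := by
    intro h
    exact absurd ((PySem.List.sorted_eq_nil_iff _ _ _).mp h) (by simp)
  set s := PySem.List.sorted (x :: t) (fun z => z) false with hsdef
  have hslen : s.length = t.length + 1 := by rw [hperm.length_eq]; rfl
  have hL : PySem.List.len s = ((s.length : Nat) : Int) := by simp [pysem]
  have hfd : PySem.Int.floordiv (PySem.List.len s) 2 = ((s.length / 2 : Nat) : Int) := by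
    rw [hL]; exact_mod_cast PySem.Int.floordiv_natCast s.length 2
  have hfd' : PySem.List.len s - ((s.length / 2 : Nat) : Int)
      = ((s.length - s.length / 2 : Nat) : Int) := by rw [hL]; omega
  have halt : check_alt (x :: t) =
      if cutOk s (PySem.List.len s) ((s.length / 2 : Nat) : Int)
        || cutOk s (PySem.List.len s) ((s.length - s.length / 2 : Nat) : Int)
      then "Yes" else "No" := by
    simp only [check_alt, ← hsdef, hfd, hfd']
  rcases hh : PySem.Set.ofList (x :: t) with _ | ⟨a, _ | ⟨b, _ | ⟨c, rest⟩⟩⟩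
  · -- impossible: a nonempty list has a nonempty set
    have := ofList_head? (x :: t); rw [hh] at this; simp at this
  · -- one distinct value
    have hx : x = a := by
      have := ofList_head? (x :: t); rw [hh] at this; simpa using this.symm
    subst hx
    have hall : ∀ y ∈ t, x = y := by
      intro y hy
      have : y ∈ PySem.Set.ofList (x :: t) :=
        (PySem.Set.mem_ofList _ _).mpr (List.mem_cons_of_mem _ hy)
      rw [hh] at this; simp at this; omega
    have hcnt : t.count x = t.length := List.count_eq_length.mpr hall
    have hrepl : x :: t = List.replicate (t.length + 1) x := by
      rw [List.eq_replicate_iff]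
      exact ⟨by simp, fun y hy => by
        rcases List.mem_cons.mp hy with rfl | hy'
        · rfl
        · exact (hall y hy').symm⟩
    have hs_eq : s = x :: t := by
      rw [hsdef]
      apply PySem.List.sorted_eq_self_of_pairwise
      rw [hrepl]; exact List.pairwise_replicate_of_refl
    rw [halt]
    simp only [check, hh]
    rw [counter1_eq, hcnt]
    rw [if_neg (by simp [PySem.Set.len]),
      if_pos (by simp [pysem]; omega)]
    have hhead : s.head hsne = x := by rw [List.head_eq_getElem hsne]; simp [hs_eq]
    have hlast : s.getLast hsne = x := by
      have hm : s.getLast hsne ∈ x :: t := hperm.mem_iff.mp (List.getLast_mem hsne)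
      rcases List.mem_cons.mp hm with h | h
      · exact h
      · exact (hall _ h).symm
    have hcond : cutOk s (PySem.List.len s) ((s.length / 2 : Nat) : Int) = true := by
      rw [cutOk_iff s hsne hpw _ (by omega), hhead, hlast, ← List.replicate_add,
        show s.length / 2 + (s.length - s.length / 2) = s.length by omega, hs_eq,
        show (x :: t).length = t.length + 1 by simp]
      exact hrepl
    rw [hcond]; simp
  · -- two distinct values
    have hx : x = a := by
      have := ofList_head? (x :: t); rw [hh] at this; simpa using this.symm
    subst hx
    have hnd : (PySem.Set.ofList (x :: t)).Nodup := PySem.Set.nodup_ofList _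
    rw [hh] at hnd
    have hab : x ≠ b := by simp at hnd; tauto
    have hmem : ∀ y ∈ x :: t, y = x ∨ y = b := by
      intro y hy
      have : y ∈ PySem.Set.ofList (x :: t) := (PySem.Set.mem_ofList _ _).mpr hy
      rw [hh] at this; simpa using this
    have hbmem : b ∈ x :: t := by
      have : b ∈ PySem.Set.ofList (x :: t) := by rw [hh]; simp
      exact (PySem.Set.mem_ofList _ _).mp this
    have hca : 0 < (x :: t).count x := List.count_pos_iff.mpr List.mem_cons_self
    have hcb : 0 < (x :: t).count b := List.count_pos_iff.mpr hbmem
    have hsum : (x :: t).count x + (x :: t).count b = (x :: t).length :=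
      count_pair x b hab _ hmem
    -- B's condition holds iff the count of the smaller value is ⌊n/2⌋ or ⌈n/2⌉
    have hslen2 : s.length = (x :: t).length := hperm.length_eq
    have hcut : ∀ c : Nat, c ≤ s.length →
        (cutOk s (PySem.List.len s) (c : Int) = true ↔
          c = (x :: t).count (if x < b then x else b)) := by
      intro c hc
      rcases lt_or_gt_of_ne hab with hlt | hgt
      · rw [if_pos hlt]
        exact cut_two x t x b hlt hmem List.mem_cons_self hbmem c hc
      · rw [if_neg (by omega)]
        exact cut_two x t b x hgt (fun y hy => (hmem y hy).symm) hbmem List.mem_cons_self c hc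
    -- A's value
    simp only [check, hh]
    rw [counter1_eq]
    rw [if_neg (by simp [PySem.Set.len])]
    have hc1 : (1 : Int) + (t.count x : Int) = ((x :: t).count x : Int) := by
      simp; omega
    rw [hc1]
    have hlen' : PySem.List.len (x :: t) = (((x :: t).length : Nat) : Int) := by simp [pysem]
    rw [hlen', if_neg (by omega)]
    rw [halt]
    by_cases hbal : ((x :: t).count (if x < b then x else b) = s.length / 2 ∨
        (x :: t).count (if x < b then x else b) = s.length - s.length / 2)
    · rw [if_neg, if_pos]
      · rw [Bool.or_eq_true, hcut _ (by omega), hcut _ (by omega)]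
        omega
      · rw [gt_iff_lt, not_lt, abs_le]
        split_ifs at hbal with hxb <;> omega
    · rw [if_pos, if_neg]
      · rw [Bool.or_eq_true, hcut _ (by omega), hcut _ (by omega)]
        omega
      · rw [gt_iff_lt, lt_abs]
        split_ifs at hbal with hxb <;> omega
  · -- three or more distinct values: A's guard fires and no cut is constant-constant
    have hnd : (PySem.Set.ofList (x :: t)).Nodup := PySem.Set.nodup_ofList _
    rw [hh] at hnd
    have habc : a ≠ b ∧ a ≠ c ∧ b ≠ c := by simp at hnd; tauto
    have hmem3 : a ∈ x :: t ∧ b ∈ x :: t ∧ c ∈ x :: t := by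
      refine ⟨?_, ?_, ?_⟩ <;>
        [exact (PySem.Set.mem_ofList _ _).mp (by rw [hh]; simp);
         exact (PySem.Set.mem_ofList _ _).mp (by rw [hh]; simp);
         exact (PySem.Set.mem_ofList _ _).mp (by rw [hh]; simp)]
    have hno : ∀ cn : Nat, cn ≤ s.length → cutOk s (PySem.List.len s) (cn : Int) ≠ true := by
      intro cn hcn hcut
      rw [cutOk_iff s hsne hpw cn hcn] at hcut
      have htwo : ∀ y ∈ x :: t, y = s.head hsne ∨ y = s.getLast hsne := by
        intro y hy
        have : y ∈ s := hperm.mem_iff.mpr hy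
        rw [hcut] at this
        rcases List.mem_append.mp this with h | h
        · exact Or.inl (List.eq_of_mem_replicate h)
        · exact Or.inr (List.eq_of_mem_replicate h)
      rcases htwo a hmem3.1 with h1 | h1 <;> rcases htwo b hmem3.2.1 with h2 | h2 <;>
        rcases htwo c hmem3.2.2 with h3 | h3 <;> omega
    simp only [check, hh]
    rw [if_pos (by simp [PySem.Set.len]; omega)]
    rw [halt, if_neg]
    simp only [Bool.or_eq_true]
    rintro (h | h)
    · exact hno _ (by omega) h
    · exact hno _ (by omega) h

-- ===== VERDICT (by name: the statements are the Claim_ definitions above) =====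
theorem check_spec : Claim_unchanged_check := by
  intro arr _ hD
  exact main_eq arr hD

theorem check_changed : Claim_changed_check := by unfold Claim_changed_check; decide

theorem check_tight : Claim_exact_check := by
  intro arr _ hD
  unfold D_check at hD; subst hD; decide
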